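-- pv_equiv track=rewrite | github.com/aaronjbecker/birth-heatmaps | data-pipeline/src/exporters/states_exporter.py | trim_leading_trailing_nulls
-- ===== SOURCE A (Python) =====
-- from typing import List, Dict, Any, Optional
--
-- def trim_leading_trailing_nulls(data: List[Dict[str, Any]], value_key: str = 'value') -> List[Dict[str, Any]]:
--     """
--     Remove leading and trailing entries with null values from data array.
--
--     Like stripping whitespace from a string - null values in the middle are preserved,
--     but null values at the beginning or end are removed.
--     """
--     if not data:
--         return data
--
--     sorted_data = sorted(data, key=lambda x: (x['year'], x['month']))
--
--     first_valid = None
--     for i, item in enumerate(sorted_data):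
--         if item.get(value_key) is not None:
--             first_valid = i
--             break
--
--     if first_valid is None:
--         return []
--
--     last_valid = None
--     for i in range(len(sorted_data) - 1, -1, -1):
--         if sorted_data[i].get(value_key) is not None:
--             last_valid = i
--             break
--
--     return sorted_data[first_valid:last_valid + 1]
-- ===== SOURCE B (Python) =====
-- def trim_leading_trailing_nulls(data, value_key='value'):
--     if not data:
--         return data
--
--     sorted_data = sorted(data, key=lambda x: (x['year'], x['month']))
--
--     # strip null entries destructively from the tail, flip, strip the (former
--     # leading) nulls from the tail again, flip back -- no indices, no slicing
--     sorted_data.reverse()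
--     while sorted_data and sorted_data[-1].get(value_key) is None:
--         sorted_data.pop()
--     sorted_data.reverse()
--     while sorted_data and sorted_data[-1].get(value_key) is None:
--         sorted_data.pop()
--     return sorted_data
-- ===== Notes on version B (the rewrite author's own statement) =====
-- stated objective: alternative
-- what changed: A hunts for the first and last non-null INDEX (forward enumerate-and-break, then a backward range loop) and slices once; B never computes an index: it destructively pops null entries off the tail of the sorted list, reverses it, pops the (formerly leading) nulls off the tail again and reverses back, so the result is built by trimming, not by slicing.
import Mathlib
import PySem

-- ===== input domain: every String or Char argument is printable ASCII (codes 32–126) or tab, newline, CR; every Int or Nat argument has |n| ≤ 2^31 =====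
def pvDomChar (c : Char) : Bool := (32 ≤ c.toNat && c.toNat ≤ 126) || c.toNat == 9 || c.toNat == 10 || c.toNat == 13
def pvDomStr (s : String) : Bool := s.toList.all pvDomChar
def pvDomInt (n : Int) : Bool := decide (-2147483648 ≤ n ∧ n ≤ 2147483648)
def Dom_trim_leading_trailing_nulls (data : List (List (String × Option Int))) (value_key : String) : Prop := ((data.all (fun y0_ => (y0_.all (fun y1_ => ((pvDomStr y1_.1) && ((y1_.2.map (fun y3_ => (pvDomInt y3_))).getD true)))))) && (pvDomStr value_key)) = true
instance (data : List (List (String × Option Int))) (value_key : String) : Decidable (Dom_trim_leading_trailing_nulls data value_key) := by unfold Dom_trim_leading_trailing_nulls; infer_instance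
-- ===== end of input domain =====

-- B replaces A's two index-hunting scans + slice by index-free trimming: pop nulls off the tail, reverse, pop again, reverse back (alternative decomposition, same cost).


-- ===== PORT A =====
-- first-match lookup in the association list (dict access / dict.get)
def pvLookup (item : List (String × Option Int)) (k : String) : Option (Option Int) :=
  match item with
  | [] => none
  | (k', v) :: rest => if k' = k then some v else pvLookup rest k

-- x[k] used as a sort-key component: exact under Pre_ (key present with an int value)
def pvKey (item : List (String × Option Int)) (k : String) : Int :=
  ((pvLookup item k).getD none).getD 0

-- item.get(k)  (None when the key is absent)
def pvGetV (item : List (String × Option Int)) (k : String) : Option Int :=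
  (pvLookup item k).getD none

-- A's first loop: 'for i, item in enumerate(sorted_data): if … is not None: first_valid = i; break'
def pvFrontLoop (vk : String) : List (List (String × Option Int)) → Int → Option Int
  | [], _ => none
  | it :: rest, i => if (pvGetV it vk).isSome then some i else pvFrontLoop vk rest (i + 1)

-- A's second loop: 'for i in range(len(sorted_data)-1, -1, -1): if … is not None: last_valid = i; break'
def pvBackLoop (sorted_data : List (List (String × Option Int))) (vk : String) : List Int → Option Int
  | [] => none
  | i :: rest =>
      if (pvGetV (PySem.List.pyGetD sorted_data i []) vk).isSome then some i
      else pvBackLoop sorted_data vk rest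

def trim_leading_trailing_nulls (data : List (List (String × Option Int))) (value_key : String) : List (List (String × Option Int)) :=
  match data with
  | [] => data
  | _ :: _ =>
    let sorted_data := PySem.List.sorted2 data (fun x => pvKey x "year") (fun x => pvKey x "month")
    match pvFrontLoop value_key sorted_data 0 with
    | none => []
    | some first_valid =>
      match pvBackLoop sorted_data value_key (PySem.List.pyRange ((sorted_data.length : Int) - 1) (-1) (-1)) with
      | none => []   -- unreachable when first_valid was found (Python would raise on None + 1)
      | some last_valid => PySem.List.slice sorted_data (some first_valid) (some (last_valid + 1))

-- ===== PORT B =====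
-- B's trimming loop: 'while l and l[-1].get(value_key) is None: l.pop()'
def pvTrimBack (vk : String) (l : List (List (String × Option Int))) : List (List (String × Option Int)) :=
  if h : l = [] then l
  else if (pvGetV (l.getLast h) vk).isSome then l
  else pvTrimBack vk l.dropLast
termination_by l.length
decreasing_by
  have hp := List.length_pos_of_ne_nil h
  simp [List.length_dropLast]
  omega

def trim_leading_trailing_nulls_alt (data : List (List (String × Option Int))) (value_key : String) : List (List (String × Option Int)) :=
  match data with
  | [] => data
  | _ :: _ =>
    let sorted_data := PySem.List.sorted2 data (fun x => pvKey x "year") (fun x => pvKey x "month")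
    -- sorted_data.reverse(); trim tail; sorted_data.reverse(); trim tail
    pvTrimBack value_key (pvTrimBack value_key sorted_data.reverse).reverse

-- ===== PRECONDITION & SPEC =====
-- Pre_ admits exactly the inputs where A's sort cannot raise: every entry has 'year' and 'month'
-- keys (else KeyError from the sort key), and every pair of entries is safe to compare: equal key
-- tuples, or the first differing component ('year', else 'month') is an int on both sides
-- (otherwise a tuple-key comparison would reach None vs int, or None vs None under <, and raise TypeError).
def Pre_trim_leading_trailing_nulls (data : List (List (String × Option Int))) (value_key : String) : Prop :=
  (∀ item ∈ data, (item.find? (fun q => q.1 = "year")).isSome = true ∧ (item.find? (fun q => q.1 = "month")).isSome = true) ∧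
  List.Pairwise (fun a b => (a.1 = b.1 ∧ (a.2 = b.2 ∨ (a.2.isSome = true ∧ b.2.isSome = true))) ∨
                            (a.1 ≠ b.1 ∧ a.1.isSome = true ∧ b.1.isSome = true))
    (data.map (fun item => (((item.find? (fun q => q.1 = "year")).map (fun q => q.2)).getD none,
                            ((item.find? (fun q => q.1 = "month")).map (fun q => q.2)).getD none)))
instance (data : List (List (String × Option Int))) (value_key : String) : Decidable (Pre_trim_leading_trailing_nulls data value_key) := by unfold Pre_trim_leading_trailing_nulls; infer_instance

def pvWitness_trim_leading_trailing_nulls : (List (List (String × Option Int))) × String :=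
  ([[("year", some 1), ("month", some 2), ("value", none)],
    [("year", some 1), ("month", some 1), ("value", some 5)]], "value")

def Spec_trim_leading_trailing_nulls (data : List (List (String × Option Int))) (value_key : String) (out : List (List (String × Option Int))) : Prop := out = trim_leading_trailing_nulls_alt data value_key
instance (data : List (List (String × Option Int))) (value_key : String) (out : List (List (String × Option Int))) : Decidable (Spec_trim_leading_trailing_nulls data value_key out) := by unfold Spec_trim_leading_trailing_nulls; infer_instance

-- ===== CLAIM (what is proved, stated in full; the proofs are below) =====
def Claim_equal_trim_leading_trailing_nulls : Prop := ∀ (data : List (List (String × Option Int))) (value_key : String), Dom_trim_leading_trailing_nulls data value_key → Pre_trim_leading_trailing_nulls data value_key → Spec_trim_leading_trailing_nulls data value_key (trim_leading_trailing_nulls data value_key)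

-- ===== LEMMAS AND PROOFS =====

-- the 'is None' test as a dropWhile predicate
def pvNull (vk : String) (x : List (String × Option Int)) : Bool := !(pvGetV x vk).isSome

-- A's body on the sorted list, as a standalone function of the list
def pvABody (vk : String) (s : List (List (String × Option Int))) : List (List (String × Option Int)) :=
  match pvFrontLoop vk s 0 with
  | none => []
  | some f =>
    match pvBackLoop s vk (PySem.List.pyRange ((s.length : Int) - 1) (-1) (-1)) with
    | none => []
    | some l => PySem.List.slice s (some f) (some (l + 1))

-- the doubly-trimmed canonical form both programs compute
def pvCanon (vk : String) (s : List (List (String × Option Int))) : List (List (String × Option Int)) :=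
  (((s.dropWhile (pvNull vk)).reverse).dropWhile (pvNull vk)).reverse

theorem pv_front_char (vk : String) (s : List (List (String × Option Int))) (i : Int) :
    pvFrontLoop vk s i =
      if (s.takeWhile (pvNull vk)).length = s.length then none
      else some (i + ((s.takeWhile (pvNull vk)).length : Int)) := by
  induction s generalizing i with
  | nil => simp [pvFrontLoop]
  | cons x rest ih =>
      by_cases h : (pvGetV x vk).isSome
      · simp [pvFrontLoop, h, pvNull, List.takeWhile]
      · have hx : pvNull vk x = true := by simp [pvNull, h]
        simp only [pvFrontLoop, h, Bool.false_eq_true, ite_false, ih,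
          List.takeWhile_cons, hx, ite_true, List.length_cons]
        by_cases hl : (rest.takeWhile (pvNull vk)).length = rest.length
        · simp [hl]
        · simp only [hl, ite_false]
          have : ¬ ((rest.takeWhile (pvNull vk)).length + 1 = rest.length + 1) := by omega
          simp only [this, ite_false]
          congr 1
          push_cast; ring

theorem pv_front_snoc (vk : String) (xs : List (List (String × Option Int))) (y : List (String × Option Int)) (i : Int) :
    pvFrontLoop vk (xs ++ [y]) i =
      match pvFrontLoop vk xs i with
      | some j => some j
      | none => if (pvGetV y vk).isSome then some (i + xs.length) else none := by
  induction xs generalizing i with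
  | nil => simp [pvFrontLoop]
  | cons a t ih =>
      simp only [List.cons_append, pvFrontLoop]
      by_cases h : (pvGetV a vk).isSome
      · simp [h]
      · simp only [h, Bool.false_eq_true, ite_false, ih]
        cases pvFrontLoop vk t (i + 1) with
        | some j => rfl
        | none => simp only [List.length_cons]; push_cast; ring_nf

theorem pv_back_congr (xs : List (List (String × Option Int))) (y : List (String × Option Int)) (vk : String) (l : List Int)
    (hl : ∀ i ∈ l, 0 ≤ i ∧ i < (xs.length : Int)) :
    pvBackLoop (xs ++ [y]) vk l = pvBackLoop xs vk l := by
  induction l with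
  | nil => rfl
  | cons i rest ih =>
      have hi := hl i (by simp)
      have hget : PySem.List.pyGetD (xs ++ [y]) i ([] : List (String × Option Int)) = PySem.List.pyGetD xs i [] := by
        rw [PySem.List.pyGetD_eq_getElem (xs ++ [y]) [] hi.1 (by simp; omega),
            PySem.List.pyGetD_eq_getElem xs [] hi.1 hi.2]
        exact List.getElem_append_left (by omega)
      simp only [pvBackLoop]
      rw [hget, ih (fun j hj => hl j (by simp [hj]))]

theorem pv_back_mem (s : List (List (String × Option Int))) (vk : String) (li : List Int) (l : Int)
    (h : pvBackLoop s vk li = some l) : l ∈ li := by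
  induction li with
  | nil => simp [pvBackLoop] at h
  | cons i rest ih =>
      simp only [pvBackLoop] at h
      split at h
      · simp at h; simp [h]
      · exact List.mem_cons_of_mem _ (ih h)

theorem pv_dropWhile_eq_drop {α : Type} (p : α → Bool) (l : List α) :
    l.dropWhile p = l.drop (l.takeWhile p).length := by
  induction l with
  | nil => rfl
  | cons x rest ih =>
      by_cases h : p x
      · simp [h, ih]
      · simp [h]

-- slicing within the first part of an append ignores the appended element
theorem pv_slice_append {α : Type} (ys : List α) (y : α) (f l1 : Int)
    (hf : 0 ≤ f) (hl0 : 0 ≤ l1) (hl : l1.toNat ≤ ys.length) :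
    PySem.List.slice (ys ++ [y]) (some f) (some l1) = PySem.List.slice ys (some f) (some l1) := by
  rw [PySem.List.slice_toNat _ hf hl0, PySem.List.slice_toNat _ hf hl0]
  by_cases hfl : f.toNat ≤ ys.length
  · rw [List.drop_append_of_le_length hfl,
        List.take_append_of_le_length (by simp; omega)]
  · have h2 : (ys ++ [y]).length ≤ f.toNat := by simp; omega
    rw [List.drop_eq_nil_of_le h2, List.drop_eq_nil_of_le (by omega : ys.length ≤ f.toNat)]

theorem pv_trimBack_eq (vk : String) (l : List (List (String × Option Int))) :
    pvTrimBack vk l = (l.reverse.dropWhile (pvNull vk)).reverse := by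
  induction l using List.reverseRecOn with
  | nil => simp [pvTrimBack]
  | append_singleton ys y ih =>
      rw [pvTrimBack, dif_neg (by simp : ¬(ys ++ [y] = []))]
      have hlast : (ys ++ [y]).getLast (by simp) = y := List.getLast_concat
      rw [hlast]
      by_cases h : (pvGetV y vk).isSome
      · simp [h, pvNull]
      · have hx : pvNull vk y = true := by simp [pvNull, h]
        simp [h, hx, ih]

theorem pv_abody_canon (vk : String) (s : List (List (String × Option Int))) :
    pvABody vk s = pvCanon vk s := by
  induction s using List.reverseRecOn with
  | nil => simp [pvABody, pvFrontLoop, pvCanon]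
  | append_singleton ys y ih =>
      by_cases hy : (pvGetV y vk).isSome
      · -- last element is non-null: A returns dropWhile, canon strips nothing at the back
        have hyq : pvNull vk y = false := by simp [pvNull, hy]
        have hfront := pv_front_char vk (ys ++ [y]) 0
        have htw : ((ys ++ [y]).takeWhile (pvNull vk)).length ≠ (ys ++ [y]).length := by
          intro hlen
          have hpre := List.takeWhile_prefix (l := ys ++ [y]) (p := pvNull vk)
          have heq : (ys ++ [y]).takeWhile (pvNull vk) = ys ++ [y] :=
            List.IsPrefix.eq_of_length hpre hlen
          have : pvNull vk y = true := List.mem_takeWhile_imp (l := ys ++ [y]) (by rw [heq]; simp)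
          rw [hyq] at this; exact absurd this (by simp)
        have hle : ((ys ++ [y]).takeWhile (pvNull vk)).length ≤ (ys ++ [y]).length :=
          (List.takeWhile_prefix _).length_le
        set t := ((ys ++ [y]).takeWhile (pvNull vk)).length with ht
        have htle : t ≤ ys.length := by
          have htw2 := htw
          simp only [List.length_append, List.length_cons, List.length_nil] at hle htw2
          omega
        -- back loop finds index ys.length immediately
        have hlen1 : (((ys ++ [y]).length : Int) - 1) = (ys.length : Int) := by simp
        have hrange : PySem.List.pyRange (((ys ++ [y]).length : Int) - 1) (-1) (-1)
            = (ys.length : Int) :: PySem.List.pyRange ((ys.length : Int) - 1) (-1) (-1) := by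
          rw [hlen1, PySem.List.pyRange_neg_one_cons (by omega)]
        have hgety : PySem.List.pyGetD (ys ++ [y]) (ys.length : Int) ([] : List (String × Option Int)) = y := by
          rw [PySem.List.pyGetD_eq_getElem (ys ++ [y]) [] (by omega) (by simp)]
          simp
        have hdrop : (ys ++ [y]).drop t = ys.drop t ++ [y] := by
          rw [List.drop_append_of_le_length htle]
        have hslice : PySem.List.slice (ys ++ [y]) (some (0 + (t : Int))) (some ((ys.length : Int) + 1)) = (ys ++ [y]).drop t := by
          have : ((ys.length : Int) + 1) = (((ys.length + 1 : Nat)) : Int) := by push_cast; ring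
          rw [this]
          have h0 : (0 : Int) + (t : Int) = ((t : Nat) : Int) := by ring
          rw [h0, PySem.List.slice_natCast]
          apply List.take_of_length_le
          simp
        simp only [pvABody, hfront, if_neg htw, hrange, pvBackLoop, hgety, hy, ite_true, hslice]
        -- canon side
        simp only [pvCanon, pv_dropWhile_eq_drop (pvNull vk) (ys ++ [y]), ← ht, hdrop]
        simp [hyq]
      · -- last element is null: both sides reduce to the ys case
        have hyq : pvNull vk y = true := by simp [pvNull, hy]
        have hcanon : pvCanon vk (ys ++ [y]) = pvCanon vk ys := by
          by_cases hall : ∀ x ∈ ys, pvNull vk x = true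
          · have h1 : (ys ++ [y]).dropWhile (pvNull vk) = [] := by
              rw [List.dropWhile_eq_nil_iff]
              intro x hx
              rcases List.mem_append.mp hx with h | h
              · exact hall x h
              · simp at h; subst h; exact hyq
            have h2 : ys.dropWhile (pvNull vk) = [] := by
              rw [List.dropWhile_eq_nil_iff]; exact hall
            simp [pvCanon, h1, h2]
          · have hne : ys.dropWhile (pvNull vk) ≠ [] := by
              intro hnil
              exact hall (by rw [List.dropWhile_eq_nil_iff] at hnil; exact hnil)
            have h1 : (ys ++ [y]).dropWhile (pvNull vk) = ys.dropWhile (pvNull vk) ++ [y] := by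
              rw [List.dropWhile_append]
              simp [List.isEmpty_iff, hne]
            simp [pvCanon, h1, hyq]
        rw [hcanon, ← ih]
        -- now show pvABody (ys ++ [y]) = pvABody ys
        have hsn := pv_front_snoc vk ys y 0
        cases hf : pvFrontLoop vk ys 0 with
        | none =>
            have : pvFrontLoop vk (ys ++ [y]) 0 = none := by
              rw [hsn, hf]; simp [hy]
            simp [pvABody, this, hf]
        | some f =>
            have hff : pvFrontLoop vk (ys ++ [y]) 0 = some f := by rw [hsn, hf]
            have hf0 : 0 ≤ f := by
              have hchar := pv_front_char vk ys 0
              rw [hf] at hchar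
              split at hchar
              · simp at hchar
              · simp at hchar; omega
            -- reduce the back loop on ys ++ [y] to ys
            have hlen1 : (((ys ++ [y]).length : Int) - 1) = (ys.length : Int) := by simp
            have hrange : PySem.List.pyRange (((ys ++ [y]).length : Int) - 1) (-1) (-1)
                = (ys.length : Int) :: PySem.List.pyRange ((ys.length : Int) - 1) (-1) (-1) := by
              rw [hlen1, PySem.List.pyRange_neg_one_cons (by omega)]
            have hgety : PySem.List.pyGetD (ys ++ [y]) (ys.length : Int) ([] : List (String × Option Int)) = y := by
              rw [PySem.List.pyGetD_eq_getElem (ys ++ [y]) [] (by omega) (by simp)]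
              simp
            have hback : pvBackLoop (ys ++ [y]) vk (PySem.List.pyRange (((ys ++ [y]).length : Int) - 1) (-1) (-1))
                = pvBackLoop ys vk (PySem.List.pyRange ((ys.length : Int) - 1) (-1) (-1)) := by
              rw [hrange]
              simp only [pvBackLoop, hgety, hy, Bool.false_eq_true, ite_false]
              apply pv_back_congr
              intro i hi
              have := (PySem.List.mem_pyRange_neg_one).mp hi
              omega
            simp only [pvABody, hff, hf, hback]
            cases hb : pvBackLoop ys vk (PySem.List.pyRange ((ys.length : Int) - 1) (-1) (-1)) with
            | none => rfl
            | some l =>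
                have hmem := pv_back_mem _ _ _ _ hb
                have hlb := (PySem.List.mem_pyRange_neg_one).mp hmem
                exact pv_slice_append ys y f (l + 1) hf0 (by omega) (by omega)

-- ===== VERDICT (by name: the statement is the Claim_ definition above) =====
theorem trim_leading_trailing_nulls_spec : Claim_equal_trim_leading_trailing_nulls := by
  intro data value_key _ _
  unfold Spec_trim_leading_trailing_nulls trim_leading_trailing_nulls trim_leading_trailing_nulls_alt
  cases data with
  | nil => rfl
  | cons a t =>
      simp only [pv_trimBack_eq, List.reverse_reverse]
      have h2 := pv_abody_canon value_key (PySem.List.sorted2 (a :: t) (fun x => pvKey x "year") (fun x => pvKey x "month"))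
      simp only [pvABody, pvCanon] at h2
      exact h2
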